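-- pv_equiv track=rewrite | github.com/mitzke/AI_test | Macke_neu.py | punkte
-- ===== SOURCE A (Python) =====
-- def dreigleiche (wurf, zahl):
--     anzahl = wurf.count(zahl)
--     if anzahl == 3:
--         #print (wurf)
--         for i in range(3):
--             wurf.remove(zahl)
--         return zahl, wurf
--     else:
--         return 0, wurf
--
-- def viergleiche (wurf, zahl):
--     anzahl = wurf.count(zahl)
--     if anzahl == 4:
--         #print (wurf)
--         for i in range(4):
--             wurf.remove(zahl)
--         return zahl, wurf
--     else:
--         return 0, wurf
--
-- def fuenfgleiche (wurf, zahl):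
--     anzahl = wurf.count(zahl)
--     if anzahl == 5:
--         #print (wurf)
--         for i in range(5):
--             wurf.remove(zahl)
--         return zahl, wurf
--     else:
--         return 0, wurf
--
-- def einser (wurf):
--     anzahl1 = wurf.count(1)
--     if anzahl1 in range (1,3):
--         for i in range (anzahl1):
--             wurf.remove(1)
--         return anzahl1, wurf
--     else:
--         return 0, wurf
--
-- def fuenfer (wurf):
--     anzahl5 = wurf.count(5)
--     if anzahl5 in range (1,3):
--         for i in range (anzahl5):
--             wurf.remove(5)
--         return anzahl5, wurf
--     else:
--         return 0, wurf
--
-- def punkte (wurf):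
--     wurf_neu = []
--     Gesamtpunkte = 0
--     ## Check auf drei gleiche
--     for i in range(2,7):
--         punkte, wurf_neu = dreigleiche(wurf, i)
--         Gesamtpunkte += 100*punkte
--     for i in range(2,7):
--         punkte, wurf_neu = viergleiche(wurf, i)
--         Gesamtpunkte += 200*punkte
--     for i in range(2,7):
--         punkte, wurf_neu = fuenfgleiche(wurf, i)
--         Gesamtpunkte += 300*punkte
--     ## check auf 1000
--     punkte1000, wurf_neu = dreigleiche(wurf, 1)
--     Gesamtpunkte += 1000*punkte1000
--     punkte2000, wurf_neu = viergleiche(wurf, 1)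
--     Gesamtpunkte += 2000*punkte2000
--     punkte3000, wurf_neu = fuenfgleiche(wurf, 1)
--     Gesamtpunkte += 3000*punkte3000
--     ## Check auf 1er und 5er
--     punkte1, wurf_neu = einser(wurf_neu)
--     Gesamtpunkte += punkte1*100
--     punkte5, wurf_neu = fuenfer(wurf_neu)
--     Gesamtpunkte += punkte5*50
--
--     ########################################################################
--     ##Check auf Macke auf Schuss  TODO
--     ########################################################################
--     print ("Wurfpunkte",Gesamtpunkte)
--     print ("Restwuerfel",wurf_neu)
--     return Gesamtpunkte, wurf_neu
-- ===== SOURCE B (Python) =====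
-- def _score(v, c):
--     if v == 1:
--         return {1: 100, 2: 200, 3: 1000, 4: 2000, 5: 3000}.get(c, 0)
--     elif v == 5:
--         return {1: 50, 2: 100, 3: 500, 4: 1000, 5: 1500}.get(c, 0)
--     elif v in (2, 3, 4, 6):
--         return {3: 100, 4: 200, 5: 300}.get(c, 0) * v
--     else:
--         return 0
--
-- def punkte(wurf):
--     cnt = {}
--     for x in wurf:
--         cnt[x] = cnt.get(x, 0) + 1
--     total = 0
--     scored = set()
--     for v, c in cnt.items():
--         s = _score(v, c)
--         if s:
--             total += s
--             scored.add(v)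
--     wurf[:] = [x for x in wurf if x not in scored]
--     print("Wurfpunkte", total)
--     print("Restwuerfel", wurf)
--     return total, wurf
-- ===== Notes on version B (the rewrite author's own statement) =====
-- stated objective: simpler
-- what changed: A makes 22 separate guarded count-and-remove passes over the list (five helpers, three loops over values 2..6); B builds one count dictionary, scores each distinct value once via literal per-value score tables, and filters the scored values out of the list in a single pass.
import Mathlib
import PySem

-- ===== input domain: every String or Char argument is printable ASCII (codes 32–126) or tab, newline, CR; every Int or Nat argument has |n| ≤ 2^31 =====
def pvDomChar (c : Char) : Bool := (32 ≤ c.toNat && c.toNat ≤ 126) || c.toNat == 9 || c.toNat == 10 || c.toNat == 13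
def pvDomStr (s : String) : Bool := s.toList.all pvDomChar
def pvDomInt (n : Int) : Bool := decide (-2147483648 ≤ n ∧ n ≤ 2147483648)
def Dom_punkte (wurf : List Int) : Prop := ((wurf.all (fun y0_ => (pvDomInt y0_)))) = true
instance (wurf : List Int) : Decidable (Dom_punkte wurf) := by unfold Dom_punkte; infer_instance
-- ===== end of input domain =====

-- B replaces A's 22 guarded count-and-remove passes by one count dictionary, a per-value score
-- table and a single filter pass (objective: simpler). Both programs print the same two lines and
-- mutate the argument list in place to the same content; the equivalence proved is about the
-- return value.

-- ===== PORT A =====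
-- 'for i in range(n): wurf.remove(zahl)'; every call is guarded by a count check, so remove? never fails.
def pvRemoveN (wurf : List Int) (zahl : Int) : Nat → List Int
  | 0 => wurf
  | n + 1 => pvRemoveN ((PySem.List.remove? wurf zahl).getD wurf) zahl n

def dreigleiche (wurf : List Int) (zahl : Int) : Int × List Int :=
  let anzahl := PySem.List.count wurf zahl
  if anzahl = 3 then (zahl, pvRemoveN wurf zahl 3) else (0, wurf)

def viergleiche (wurf : List Int) (zahl : Int) : Int × List Int :=
  let anzahl := PySem.List.count wurf zahl
  if anzahl = 4 then (zahl, pvRemoveN wurf zahl 4) else (0, wurf)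

def fuenfgleiche (wurf : List Int) (zahl : Int) : Int × List Int :=
  let anzahl := PySem.List.count wurf zahl
  if anzahl = 5 then (zahl, pvRemoveN wurf zahl 5) else (0, wurf)

def einser (wurf : List Int) : Int × List Int :=
  let anzahl1 := PySem.List.count wurf 1
  if anzahl1 = 1 ∨ anzahl1 = 2 then ((anzahl1 : Int), pvRemoveN wurf 1 anzahl1) else (0, wurf)

def fuenfer (wurf : List Int) : Int × List Int :=
  let anzahl5 := PySem.List.count wurf 5
  if anzahl5 = 1 ∨ anzahl5 = 2 then ((anzahl5 : Int), pvRemoveN wurf 5 anzahl5) else (0, wurf)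

-- In the Python, every helper is called on (and mutates) the one list object 'wurf', and
-- 'wurf_neu' is always that same object once assigned; the single threaded list below is that object.
def punkte (wurf : List Int) : Int × List Int :=
  let st1 := (PySem.List.pyRange 2 7 1).foldl
    (fun (st : Int × List Int) i => let r := dreigleiche st.2 i; (st.1 + 100 * r.1, r.2)) (0, wurf)
  let st2 := (PySem.List.pyRange 2 7 1).foldl
    (fun (st : Int × List Int) i => let r := viergleiche st.2 i; (st.1 + 200 * r.1, r.2)) st1
  let st3 := (PySem.List.pyRange 2 7 1).foldl
    (fun (st : Int × List Int) i => let r := fuenfgleiche st.2 i; (st.1 + 300 * r.1, r.2)) st2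
  let r1000 := dreigleiche st3.2 1
  let g1000 := st3.1 + 1000 * r1000.1
  let r2000 := viergleiche r1000.2 1
  let g2000 := g1000 + 2000 * r2000.1
  let r3000 := fuenfgleiche r2000.2 1
  let g3000 := g2000 + 3000 * r3000.1
  let r1 := einser r3000.2
  let g1 := g3000 + r1.1 * 100
  let r5 := fuenfer r1.2
  (g1 + r5.1 * 50, r5.2)

-- ===== PORT B =====
def pyScore (v c : Int) : Int :=
  if v == 1 then (PySem.Dict.ofList [((1 : Int), (100 : Int)), (2, 200), (3, 1000), (4, 2000), (5, 3000)]).getD c 0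
  else if v == 5 then (PySem.Dict.ofList [((1 : Int), (50 : Int)), (2, 100), (3, 500), (4, 1000), (5, 1500)]).getD c 0
  else if v == 2 || v == 3 || v == 4 || v == 6 then (PySem.Dict.ofList [((3 : Int), (100 : Int)), (4, 200), (5, 300)]).getD c 0 * v
  else 0

def punkte_alt (wurf : List Int) : Int × List Int :=
  let cnt := wurf.foldl (fun (d : PySem.Dict Int Int) x => d.modify x 0 (· + 1)) PySem.Dict.empty
  let st := cnt.items.foldl
    (fun (st : Int × PySem.Set Int) p =>
      let s := pyScore p.1 p.2
      if s ≠ 0 then (st.1 + s, PySem.Set.add st.2 p.1) else st)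
    (0, PySem.Set.empty)
  (st.1, wurf.filter (fun x => !(PySem.Set.contains st.2 x)))

-- ===== PRECONDITION & SPEC =====
def Spec_punkte (wurf : List Int) (out : Int × List Int) : Prop := out = punkte_alt wurf
instance (wurf : List Int) (out : Int × List Int) : Decidable (Spec_punkte wurf out) := by unfold Spec_punkte; infer_instance

-- ===== CLAIM (what is proved, stated in full; the proofs are below) =====
def Claim_equal_punkte : Prop := ∀ (wurf : List Int), Dom_punkte wurf → Spec_punkte wurf (punkte wurf)

-- ===== LEMMAS AND PROOFS =====

-- One generic "stage": fire on an exact count, add the points and drop all copies of the value.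
def pvStep (st : Int × List Int) (s : Int × Nat × Int) : Int × List Int :=
  if List.count s.1 st.2 = s.2.1 then (st.1 + s.2.2, st.2.filter (fun x => !(x == s.1))) else st

-- A's 22 checks, in A's order: (value, exact count, points).
def pvStages : List (Int × Nat × Int) :=
  [(2,3,200),(3,3,300),(4,3,400),(5,3,500),(6,3,600),
   (2,4,400),(3,4,600),(4,4,800),(5,4,1000),(6,4,1200),
   (2,5,600),(3,5,900),(4,5,1200),(5,5,1500),(6,5,1800),
   (1,3,1000),(1,4,2000),(1,5,3000),(1,1,100),(1,2,200),(5,1,50),(5,2,100)]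

def pvFired (w0 : List Int) (L : List (Int × Nat × Int)) (x : Int) : Bool :=
  L.any (fun s => x == s.1 && List.count s.1 w0 == s.2.1)

theorem pv_filter_erase (w : List Int) (z : Int) :
    (w.erase z).filter (fun x => !(x == z)) = w.filter (fun x => !(x == z)) := by
  induction w with
  | nil => rfl
  | cons a w ih =>
    by_cases h : a = z
    · subst h; simp [List.erase_cons_head]
    · have hb : (a == z) = false := by simp [h]
      simp [List.erase_cons_tail, hb, ih]


theorem pv_removeN_count (n : Nat) (w : List Int) (z : Int) (h : List.count z w = n) :
    pvRemoveN w z n = w.filter (fun x => !(x == z)) := by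
  induction n generalizing w with
  | zero =>
    have hz : z ∉ w := by
      intro hm
      have := List.count_pos_iff.mpr hm
      omega
    have : w.filter (fun x => !(x == z)) = w := by
      apply List.filter_eq_self.mpr
      intro x hx
      simp
      intro hxz
      exact hz (hxz ▸ hx)
    simp [pvRemoveN, this]
  | succ n ih =>
    have hm : z ∈ w := by
      apply List.count_pos_iff.mp
      omega
    have hr := PySem.List.remove?_eq_some_erase w z hm
    have hc : List.count z (w.erase z) = n := by
      rw [List.count_erase_self, h]
      omega
    simp only [pvRemoveN, hr, Option.getD_some]
    rw [ih _ hc, pv_filter_erase]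


theorem pv_count_filter_neg (w : List Int) (p : Int → Bool) (a : Int) (h : p a = false) :
    List.count a (w.filter p) = 0 := by
  rw [List.count_eq_zero]
  intro hm
  rcases List.mem_filter.mp hm with ⟨_, hp⟩
  rw [h] at hp
  exact absurd hp (by simp)


theorem pv_drei_step (t : Int) (w : List Int) (m z : Int) :
    (t + m * (dreigleiche w z).1, (dreigleiche w z).2) = pvStep (t, w) (z, 3, m * z) := by
  unfold dreigleiche pvStep
  simp only [PySem.List.count_eq]
  by_cases h : List.count z w = 3
  · simp [h, pv_removeN_count 3 w z h]
  · simp [h]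


theorem pv_vier_step (t : Int) (w : List Int) (m z : Int) :
    (t + m * (viergleiche w z).1, (viergleiche w z).2) = pvStep (t, w) (z, 4, m * z) := by
  unfold viergleiche pvStep
  simp only [PySem.List.count_eq]
  by_cases h : List.count z w = 4
  · simp [h, pv_removeN_count 4 w z h]
  · simp [h]


theorem pv_fuenf_step (t : Int) (w : List Int) (m z : Int) :
    (t + m * (fuenfgleiche w z).1, (fuenfgleiche w z).2) = pvStep (t, w) (z, 5, m * z) := by
  unfold fuenfgleiche pvStep
  simp only [PySem.List.count_eq]
  by_cases h : List.count z w = 5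
  · simp [h, pv_removeN_count 5 w z h]
  · simp [h]


theorem pv_einser_step (t : Int) (w : List Int) :
    (t + (einser w).1 * 100, (einser w).2) = pvStep (pvStep (t, w) (1, 1, 100)) (1, 2, 200) := by
  unfold einser pvStep
  simp only [PySem.List.count_eq]
  by_cases h1 : List.count 1 w = 1
  · have hf : List.count (1 : Int) (w.filter (fun x => !(x == 1))) = 0 :=
      pv_count_filter_neg w _ 1 (by simp)
    simp [h1, hf, pv_removeN_count 1 w 1 h1]
  · by_cases h2 : List.count 1 w = 2
    · have hf : List.count (1 : Int) (w.filter (fun x => !(x == 1))) = 0 :=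
        pv_count_filter_neg w _ 1 (by simp)
      simp [h2, pv_removeN_count 2 w 1 h2]
    · simp [h1, h2]


theorem pv_fuenfer_step (t : Int) (w : List Int) :
    (t + (fuenfer w).1 * 50, (fuenfer w).2) = pvStep (pvStep (t, w) (5, 1, 50)) (5, 2, 100) := by
  unfold fuenfer pvStep
  simp only [PySem.List.count_eq]
  by_cases h1 : List.count 5 w = 1
  · have hf : List.count (5 : Int) (w.filter (fun x => !(x == 5))) = 0 :=
      pv_count_filter_neg w _ 5 (by simp)
    simp [h1, hf, pv_removeN_count 1 w 5 h1]
  · by_cases h2 : List.count 5 w = 2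
    · have hf : List.count (5 : Int) (w.filter (fun x => !(x == 5))) = 0 :=
        pv_count_filter_neg w _ 5 (by simp)
      simp [h2, pv_removeN_count 2 w 5 h2]
    · simp [h1, h2]


theorem pv_loop (f : List Int → Int → Int × List Int) (k : Nat) (m : Int)
    (hf : ∀ (t : Int) (w : List Int) (z : Int),
      (t + m * (f w z).1, (f w z).2) = pvStep (t, w) (z, k, m * z)) :
    ∀ (l : List Int) (st : Int × List Int),
      l.foldl (fun (st : Int × List Int) i => let r := f st.2 i; (st.1 + m * r.1, r.2)) st
        = (l.map (fun i => (i, k, m * i))).foldl pvStep st := by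
  intro l
  induction l with
  | nil => intro st; rfl
  | cons a l ih =>
    intro st
    simp only [List.foldl_cons, List.map_cons]
    rw [← ih]
    congr 1
    have := hf st.1 st.2 a
    simpa using this

theorem pv_punkte_eq_fold (wurf : List Int) :
    punkte wurf = pvStages.foldl pvStep (0, wurf) := by
  have hr : PySem.List.pyRange 2 7 1 = [2, 3, 4, 5, 6] := by decide
  simp only [punkte, hr]
  rw [pv_loop dreigleiche 3 100 (fun t w z => pv_drei_step t w 100 z),
      pv_loop viergleiche 4 200 (fun t w z => pv_vier_step t w 200 z),
      pv_loop fuenfgleiche 5 300 (fun t w z => pv_fuenf_step t w 300 z),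
      pv_fuenfer_step, pv_einser_step, pv_fuenf_step _ _ 3000 1,
      pv_vier_step _ _ 2000 1, pv_drei_step _ _ 1000 1]
  norm_num [pvStages, List.foldl, List.map]


theorem pv_master (w0 : List Int) :
    ∀ (L P : List (Int × Nat × Int)) (t : Int),
      (P ++ L).Pairwise (fun s t => s.1 = t.1 → s.2.1 ≠ t.2.1) →
      (∀ s ∈ L, s.2.1 ≠ 0) →
      L.foldl pvStep (t, w0.filter (fun x => !pvFired w0 P x)) =
        (t + (L.map (fun s => if List.count s.1 w0 = s.2.1 then s.2.2 else 0)).sum,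
         w0.filter (fun x => !pvFired w0 (P ++ L) x)) := by
  intro L
  induction L with
  | nil => intro P t _ _; simp
  | cons s L ih =>
    intro P t hpw hk
    have hknz : s.2.1 ≠ 0 := hk s (by simp)
    have hpw' : ((P ++ [s]) ++ L).Pairwise (fun a b => a.1 = b.1 → a.2.1 ≠ b.2.1) := by
      rw [List.append_assoc]
      exact hpw
    have hkL : ∀ a ∈ L, a.2.1 ≠ 0 := fun a ha => hk a (List.mem_cons_of_mem _ ha)
    simp only [List.foldl_cons, List.map_cons, List.sum_cons]
    by_cases hc : List.count s.1 w0 = s.2.1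
    · have hnf : pvFired w0 P s.1 = false := by
        by_contra hf
        rw [Bool.not_eq_false] at hf
        rcases List.any_eq_true.mp hf with ⟨p, hpP, hpc⟩
        have hps : s.1 = p.1 ∧ List.count p.1 w0 = p.2.1 := by simpa using hpc
        rcases List.pairwise_append.mp hpw with ⟨_, _, hrel⟩
        exact hrel p hpP s (by simp) hps.1.symm (by rw [← hps.2, ← hps.1, hc])
      have hcnt : List.count s.1 ((w0.filter (fun x => !pvFired w0 P x))) = s.2.1 := by
        rw [List.count_filter (by simp [hnf])]
        exact hc
      have hstep : pvStep (t, w0.filter (fun x => !pvFired w0 P x)) s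
          = (t + s.2.2, w0.filter (fun x => !pvFired w0 (P ++ [s]) x)) := by
        simp only [pvStep, hcnt, if_true]
        rw [List.filter_filter]
        congr 1
        apply List.filter_congr
        intro x _
        simp [pvFired, List.any_append, hc, Bool.and_comm]
      rw [hstep, ih (P ++ [s]) (t + s.2.2) hpw' hkL]
      rw [List.append_assoc]
      simp only [List.cons_append, List.nil_append]
      rw [if_pos hc, add_assoc]
    · have hstep : pvStep (t, w0.filter (fun x => !pvFired w0 P x)) s
          = (t, w0.filter (fun x => !pvFired w0 (P ++ [s]) x)) := by
        have hcnt : List.count s.1 ((w0.filter (fun x => !pvFired w0 P x))) ≠ s.2.1 := by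
          cases hf : pvFired w0 P s.1 with
          | true =>
            rw [pv_count_filter_neg w0 _ s.1 (by simp [hf])]
            omega
          | false =>
            rw [List.count_filter (by simp [hf])]
            exact hc
        simp only [pvStep, if_neg hcnt]
        congr 1
        apply List.filter_congr
        intro x _
        simp [pvFired, List.any_append, hc]
      rw [hstep, ih (P ++ [s]) t hpw' hkL]
      rw [List.append_assoc]
      simp only [List.cons_append, List.nil_append]
      rw [if_neg hc, zero_add]


theorem pv_getD_zero (d : PySem.Dict Int Int) (c : Int) (h : c ∉ d.keys) : d.getD c 0 = 0 := by
  have hn : d.get? c = none := (PySem.Dict.get?_eq_none_iff_not_mem_keys d c).mpr h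
  show (d.get? c).getD 0 = 0
  rw [hn]
  rfl

-- Score closed forms at a Nat count, as sums of exclusive conditions.
theorem pv_score1 (n : Nat) : pyScore 1 (n : Int) =
    (if n = 3 then 1000 else 0) + (if n = 4 then 2000 else 0) + (if n = 5 then 3000 else 0)
      + (if n = 1 then 100 else 0) + (if n = 2 then 200 else 0) := by
  rcases n with _|_|_|_|_|_|m
  · decide
  · decide
  · decide
  · decide
  · decide
  · decide
  · have h0 : (PySem.Dict.ofList [((1 : Int), (100 : Int)), (2, 200), (3, 1000), (4, 2000), (5, 3000)]).getD ((m + 6 : Nat) : Int) 0 = 0 := by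
      apply pv_getD_zero
      have hkeys : (PySem.Dict.ofList [((1 : Int), (100 : Int)), (2, 200), (3, 1000), (4, 2000), (5, 3000)]).keys = [1, 2, 3, 4, 5] := by decide
      rw [hkeys]
      simp
      omega
    have c2 : ¬ (m + 6 = 2) := by omega
    have c3 : ¬ (m + 6 = 3) := by omega
    have c4 : ¬ (m + 6 = 4) := by omega
    have c5 : ¬ (m + 6 = 5) := by omega
    simp [pyScore, c2, c3, c4, c5]
    have e : ((m : Int) + 1 + 1 + 1 + 1 + 1 + 1) = ((m + 6 : Nat) : Int) := by push_cast; ring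
    rw [e]
    exact h0


theorem pv_score5 (n : Nat) : pyScore 5 (n : Int) =
    (if n = 3 then 500 else 0) + (if n = 4 then 1000 else 0) + (if n = 5 then 1500 else 0)
      + (if n = 1 then 50 else 0) + (if n = 2 then 100 else 0) := by
  rcases n with _|_|_|_|_|_|m
  · decide
  · decide
  · decide
  · decide
  · decide
  · decide
  · have h0 : (PySem.Dict.ofList [((1 : Int), (50 : Int)), (2, 100), (3, 500), (4, 1000), (5, 1500)]).getD ((m + 6 : Nat) : Int) 0 = 0 := by
      apply pv_getD_zero
      have hkeys : (PySem.Dict.ofList [((1 : Int), (50 : Int)), (2, 100), (3, 500), (4, 1000), (5, 1500)]).keys = [1, 2, 3, 4, 5] := by decide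
      rw [hkeys]
      simp
      omega
    have c2 : ¬ (m + 6 = 2) := by omega
    have c3 : ¬ (m + 6 = 3) := by omega
    have c4 : ¬ (m + 6 = 4) := by omega
    have c5 : ¬ (m + 6 = 5) := by omega
    simp [pyScore, c2, c3, c4, c5]
    have e : ((m : Int) + 1 + 1 + 1 + 1 + 1 + 1) = ((m + 6 : Nat) : Int) := by push_cast; ring
    rw [e]
    exact h0


theorem pv_score2 (n : Nat) : pyScore 2 (n : Int) =
    (if n = 3 then 200 else 0) + (if n = 4 then 400 else 0) + (if n = 5 then 600 else 0) := by
  rcases n with _|_|_|_|_|_|m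
  · decide
  · decide
  · decide
  · decide
  · decide
  · decide
  · have h0 : (PySem.Dict.ofList [((3 : Int), (100 : Int)), (4, 200), (5, 300)]).getD ((m + 6 : Nat) : Int) 0 = 0 := by
      apply pv_getD_zero
      have hkeys : (PySem.Dict.ofList [((3 : Int), (100 : Int)), (4, 200), (5, 300)]).keys = [3, 4, 5] := by decide
      rw [hkeys]
      simp
      omega
    have c3 : ¬ (m + 6 = 3) := by omega
    have c4 : ¬ (m + 6 = 4) := by omega
    have c5 : ¬ (m + 6 = 5) := by omega
    simp [pyScore, c3, c4, c5]
    have e : ((m : Int) + 1 + 1 + 1 + 1 + 1 + 1) = ((m + 6 : Nat) : Int) := by push_cast; ring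
    rw [e, h0]


theorem pv_score3 (n : Nat) : pyScore 3 (n : Int) =
    (if n = 3 then 300 else 0) + (if n = 4 then 600 else 0) + (if n = 5 then 900 else 0) := by
  rcases n with _|_|_|_|_|_|m
  · decide
  · decide
  · decide
  · decide
  · decide
  · decide
  · have h0 : (PySem.Dict.ofList [((3 : Int), (100 : Int)), (4, 200), (5, 300)]).getD ((m + 6 : Nat) : Int) 0 = 0 := by
      apply pv_getD_zero
      have hkeys : (PySem.Dict.ofList [((3 : Int), (100 : Int)), (4, 200), (5, 300)]).keys = [3, 4, 5] := by decide
      rw [hkeys]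
      simp
      omega
    have c3 : ¬ (m + 6 = 3) := by omega
    have c4 : ¬ (m + 6 = 4) := by omega
    have c5 : ¬ (m + 6 = 5) := by omega
    simp [pyScore, c3, c4, c5]
    have e : ((m : Int) + 1 + 1 + 1 + 1 + 1 + 1) = ((m + 6 : Nat) : Int) := by push_cast; ring
    rw [e, h0]


theorem pv_score4 (n : Nat) : pyScore 4 (n : Int) =
    (if n = 3 then 400 else 0) + (if n = 4 then 800 else 0) + (if n = 5 then 1200 else 0) := by
  rcases n with _|_|_|_|_|_|m
  · decide
  · decide
  · decide
  · decide
  · decide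
  · decide
  · have h0 : (PySem.Dict.ofList [((3 : Int), (100 : Int)), (4, 200), (5, 300)]).getD ((m + 6 : Nat) : Int) 0 = 0 := by
      apply pv_getD_zero
      have hkeys : (PySem.Dict.ofList [((3 : Int), (100 : Int)), (4, 200), (5, 300)]).keys = [3, 4, 5] := by decide
      rw [hkeys]
      simp
      omega
    have c3 : ¬ (m + 6 = 3) := by omega
    have c4 : ¬ (m + 6 = 4) := by omega
    have c5 : ¬ (m + 6 = 5) := by omega
    simp [pyScore, c3, c4, c5]
    have e : ((m : Int) + 1 + 1 + 1 + 1 + 1 + 1) = ((m + 6 : Nat) : Int) := by push_cast; ring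
    rw [e, h0]


theorem pv_score6 (n : Nat) : pyScore 6 (n : Int) =
    (if n = 3 then 600 else 0) + (if n = 4 then 1200 else 0) + (if n = 5 then 1800 else 0) := by
  rcases n with _|_|_|_|_|_|m
  · decide
  · decide
  · decide
  · decide
  · decide
  · decide
  · have h0 : (PySem.Dict.ofList [((3 : Int), (100 : Int)), (4, 200), (5, 300)]).getD ((m + 6 : Nat) : Int) 0 = 0 := by
      apply pv_getD_zero
      have hkeys : (PySem.Dict.ofList [((3 : Int), (100 : Int)), (4, 200), (5, 300)]).keys = [3, 4, 5] := by decide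
      rw [hkeys]
      simp
      omega
    have c3 : ¬ (m + 6 = 3) := by omega
    have c4 : ¬ (m + 6 = 4) := by omega
    have c5 : ¬ (m + 6 = 5) := by omega
    simp [pyScore, c3, c4, c5]
    have e : ((m : Int) + 1 + 1 + 1 + 1 + 1 + 1) = ((m + 6 : Nat) : Int) := by push_cast; ring
    rw [e, h0]


theorem pv_score_other (v : Int) (c : Int)
    (h : v ≠ 1 ∧ v ≠ 2 ∧ v ≠ 3 ∧ v ≠ 4 ∧ v ≠ 5 ∧ v ≠ 6) : pyScore v c = 0 := by
  obtain ⟨h1, h2, h3, h4, h5, h6⟩ := h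
  simp [pyScore, h1, h2, h3, h4, h5, h6]


theorem pv_score_zero (v : Int) : pyScore v 0 = 0 := by
  unfold pyScore
  split_ifs with hv1 hv5 hv246
  · rw [pv_getD_zero _ 0 (by decide)]
  · rw [pv_getD_zero _ 0 (by decide)]
  · rw [pv_getD_zero _ 0 (by decide)]
    ring
  · rfl


theorem pv_sum_stages (w0 : List Int) :
    (pvStages.map (fun s => if List.count s.1 w0 = s.2.1 then s.2.2 else 0)).sum =
      pyScore 1 (List.count 1 w0 : Int) + pyScore 2 (List.count 2 w0 : Int)
        + pyScore 3 (List.count 3 w0 : Int) + pyScore 4 (List.count 4 w0 : Int)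
        + pyScore 5 (List.count 5 w0 : Int) + pyScore 6 (List.count 6 w0 : Int) := by
  simp only [pvStages, List.map_cons, List.map_nil, List.sum_cons, List.sum_nil]
  rw [pv_score1, pv_score2, pv_score3, pv_score4, pv_score5, pv_score6]
  ring


theorem pv_sum_dedup (w0 : List Int) :
    ((PySem.Set.ofList w0).map (fun v => pyScore v (List.count v w0 : Int))).sum =
      pyScore 1 (List.count 1 w0 : Int) + pyScore 2 (List.count 2 w0 : Int)
        + pyScore 3 (List.count 3 w0 : Int) + pyScore 4 (List.count 4 w0 : Int)
        + pyScore 5 (List.count 5 w0 : Int) + pyScore 6 (List.count 6 w0 : Int) := by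
  have hnd := PySem.Set.nodup_ofList w0
  rw [← List.sum_toFinset _ hnd]
  set f : Int → Int := fun v => pyScore v (List.count v w0 : Int) with hf
  have hmemS : ∀ x : Int, x ∈ (PySem.Set.ofList w0).toFinset ↔ x ∈ w0 := by
    intro x
    rw [List.mem_toFinset, PySem.Set.mem_ofList]
  have e1 : ∑ x ∈ (PySem.Set.ofList w0).toFinset ∩ ({1, 2, 3, 4, 5, 6} : Finset Int), f x
      = ∑ x ∈ (PySem.Set.ofList w0).toFinset, f x := by
    apply Finset.sum_subset Finset.inter_subset_left
    intro x hx hnx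
    have hxT : x ∉ ({1, 2, 3, 4, 5, 6} : Finset Int) := by
      intro hT
      exact hnx (Finset.mem_inter.mpr ⟨hx, hT⟩)
    simp only [Finset.mem_insert, Finset.mem_singleton] at hxT
    simp only [not_or] at hxT
    obtain ⟨a1, a2, a3, a4, a5, a6⟩ := hxT
    exact pv_score_other x _ ⟨a1, a2, a3, a4, a5, a6⟩
  have e2 : ∑ x ∈ (PySem.Set.ofList w0).toFinset ∩ ({1, 2, 3, 4, 5, 6} : Finset Int), f x
      = ∑ x ∈ ({1, 2, 3, 4, 5, 6} : Finset Int), f x := by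
    apply Finset.sum_subset Finset.inter_subset_right
    intro x hx hnx
    have hxS : x ∉ w0 := by
      intro hw
      exact hnx (Finset.mem_inter.mpr ⟨(hmemS x).mpr hw, hx⟩)
    have hc : List.count x w0 = 0 := List.count_eq_zero.mpr hxS
    show pyScore x (List.count x w0 : Int) = 0
    rw [hc]
    exact pv_score_zero x
  rw [← e1, e2]
  rw [show ({1, 2, 3, 4, 5, 6} : Finset Int) = insert 1 (insert 2 (insert 3 (insert 4 (insert 5 ({6} : Finset Int))))) from rfl]
  rw [Finset.sum_insert (by decide), Finset.sum_insert (by decide), Finset.sum_insert (by decide),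
      Finset.sum_insert (by decide), Finset.sum_insert (by decide), Finset.sum_singleton]
  ring


theorem pv_fired_iff (w0 : List Int) (x : Int) :
    pvFired w0 pvStages x = true ↔ pyScore x (List.count x w0 : Int) ≠ 0 := by
  simp only [pvFired, pvStages, List.any_cons, List.any_nil, Bool.or_eq_true,
    Bool.and_eq_true, beq_iff_eq]
  by_cases hx1 : x = 1
  · subst hx1
    rw [pv_score1]
    norm_num
    generalize List.count (1 : Int) w0 = n
    split_ifs <;> norm_num <;> omega
  · by_cases hx2 : x = 2
    · subst hx2
      rw [pv_score2]
      norm_num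
      generalize List.count (2 : Int) w0 = n
      split_ifs <;> norm_num <;> omega
    · by_cases hx3 : x = 3
      · subst hx3
        rw [pv_score3]
        norm_num
        generalize List.count (3 : Int) w0 = n
        split_ifs <;> norm_num <;> omega
      · by_cases hx4 : x = 4
        · subst hx4
          rw [pv_score4]
          norm_num
          generalize List.count (4 : Int) w0 = n
          split_ifs <;> norm_num <;> omega
        · by_cases hx5 : x = 5
          · subst hx5
            rw [pv_score5]
            norm_num
            generalize List.count (5 : Int) w0 = n
            split_ifs <;> norm_num <;> omega
          · by_cases hx6 : x = 6
            · subst hx6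
              rw [pv_score6]
              norm_num
              generalize List.count (6 : Int) w0 = n
              split_ifs <;> norm_num <;> omega
            · rw [pv_score_other x _ ⟨hx1, hx2, hx3, hx4, hx5, hx6⟩]
              simp [hx1, hx2, hx3, hx4, hx5, hx6]


def pvFoldB : (Int × PySem.Set Int) → (Int × Int) → (Int × PySem.Set Int) :=
  fun st p => let s := pyScore p.1 p.2; if s ≠ 0 then (st.1 + s, PySem.Set.add st.2 p.1) else st

theorem pv_foldB_fst (ps : List (Int × Int)) : ∀ (t : Int) (S : PySem.Set Int),
    (ps.foldl pvFoldB (t, S)).1 = t + (ps.map (fun p => pyScore p.1 p.2)).sum := by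
  induction ps with
  | nil => intro t S; simp
  | cons p ps ih =>
    intro t S
    simp only [List.foldl_cons, pvFoldB, List.map_cons, List.sum_cons]
    by_cases hs : pyScore p.1 p.2 = 0
    · simp only [hs, ne_eq, not_true_eq_false, if_false]
      rw [ih]
      ring
    · simp only [ne_eq, hs, not_false_eq_true, if_true]
      rw [ih]
      ring


theorem pv_foldB_mem (ps : List (Int × Int)) : ∀ (t : Int) (S : PySem.Set Int) (x : Int),
    x ∈ (ps.foldl pvFoldB (t, S)).2 ↔ (x ∈ S ∨ ∃ p ∈ ps, x = p.1 ∧ pyScore p.1 p.2 ≠ 0) := by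
  induction ps with
  | nil => intro t S x; simp
  | cons p ps ih =>
    intro t S x
    simp only [List.foldl_cons, pvFoldB]
    by_cases hs : pyScore p.1 p.2 = 0
    · simp only [hs, ne_eq, not_true_eq_false, if_false]
      rw [ih]
      simp [hs]
    · simp only [ne_eq, hs, not_false_eq_true, if_true]
      rw [ih]
      simp only [PySem.Set.mem_add, List.mem_cons]
      constructor
      · rintro ((h | h) | h)
        · exact Or.inl h
        · exact Or.inr ⟨p, Or.inl rfl, h, hs⟩
        · rcases h with ⟨q, hq, hxq, hsq⟩
          exact Or.inr ⟨q, Or.inr hq, hxq, hsq⟩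
      · rintro (h | ⟨q, (rfl | hq), hxq, hsq⟩)
        · exact Or.inl (Or.inl h)
        · exact Or.inl (Or.inr hxq)
        · exact Or.inr ⟨q, hq, hxq, hsq⟩


theorem pv_main (wurf : List Int) : punkte wurf = punkte_alt wurf := by
  have hA := pv_master wurf pvStages [] 0 (by decide) (by decide)
  have hstart : wurf.filter (fun x => !pvFired wurf [] x) = wurf := by
    simp [pvFired]
  rw [hstart, List.nil_append, zero_add] at hA
  rw [pv_punkte_eq_fold, hA]
  simp only [punkte_alt]
  rw [← PySem.Dict.counter_eq_foldl, PySem.Dict.items_counter]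
  have hfold : (fun (st : Int × PySem.Set Int) p =>
      let s := pyScore p.1 p.2
      if s ≠ 0 then (st.1 + s, PySem.Set.add st.2 p.1) else st) = pvFoldB := rfl
  rw [hfold]
  set ps := (PySem.Set.ofList wurf).map (fun k => (k, (List.count k wurf : Int))) with hps
  apply Prod.ext
  · show _ = (ps.foldl pvFoldB (0, PySem.Set.empty)).1
    rw [pv_foldB_fst, pv_sum_stages, hps, List.map_map]
    rw [show ((fun p : Int × Int => pyScore p.1 p.2) ∘ fun k => (k, (List.count k wurf : Int)))
        = (fun v => pyScore v (List.count v wurf : Int)) from rfl]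
    rw [pv_sum_dedup]
    ring
  · show wurf.filter (fun x => !pvFired wurf pvStages x)
        = wurf.filter (fun x => !(PySem.Set.contains (ps.foldl pvFoldB (0, PySem.Set.empty)).2 x))
    apply List.filter_congr
    intro x hx
    have hb : pvFired wurf pvStages x
        = PySem.Set.contains ((ps.foldl pvFoldB (0, PySem.Set.empty)).2) x := by
      rw [Bool.eq_iff_iff, pv_fired_iff, PySem.Set.contains_iff, pv_foldB_mem]
      simp only [hps, List.mem_map]
      constructor
      · intro hne
        refine Or.inr ⟨(x, (List.count x wurf : Int)), ⟨x, ?_, rfl⟩, rfl, hne⟩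
        rw [PySem.Set.mem_ofList]
        exact hx
      · rintro (h | ⟨q, ⟨v, hv, rfl⟩, rfl, hne⟩)
        · simp [PySem.Set.empty] at h
        · exact hne
    rw [hb]


-- ===== VERDICT (by name: the statement is the Claim_ definition above) =====
theorem punkte_spec : Claim_equal_punkte := by
  intro wurf _
  unfold Spec_punkte
  exact pv_main wurf
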